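-- pv_equiv track=rewrite | github.com/gmoutzou/csv_validator | v_local_library.py | no_inner_multispace
-- ===== SOURCE A (Python) =====
-- def no_inner_multispace(value, value_range):
--     if value:
--         space = 0
--         for c in value.strip():
--             if c == " ":
--                 if space == 0:
--                     space += 1
--                 elif space == 1:
--                     return False
--             elif space == 1:
--                 space = 0
--         return True
--     else:
--         return True
-- ===== SOURCE B (Python) =====
-- def no_inner_multispace(value, value_range):
--     return "  " not in value.strip()
-- ===== Notes on version B (the rewrite author's own statement) =====
-- stated objective: idiomatic
-- what changed: Replaced the character-by-character space-flag state-machine loop by a single substring test: a double space in value.strip(); the empty-string guard disappears since it is subsumed.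
import Mathlib
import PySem

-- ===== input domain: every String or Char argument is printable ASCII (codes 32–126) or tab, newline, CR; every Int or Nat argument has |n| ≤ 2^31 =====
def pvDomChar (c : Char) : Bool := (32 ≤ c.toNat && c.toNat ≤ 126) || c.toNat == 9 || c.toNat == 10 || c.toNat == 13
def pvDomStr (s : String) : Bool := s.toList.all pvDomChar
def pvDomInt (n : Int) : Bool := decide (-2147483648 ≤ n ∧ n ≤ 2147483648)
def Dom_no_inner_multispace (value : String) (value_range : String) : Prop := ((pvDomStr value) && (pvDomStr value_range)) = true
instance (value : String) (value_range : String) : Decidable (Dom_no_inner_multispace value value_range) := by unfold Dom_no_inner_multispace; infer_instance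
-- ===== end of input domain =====

-- B replaces A's character-by-character space-flag state machine by a single
-- "double space in value.strip()" substring test (idiomatic, same cost).


-- ===== PORT A =====
-- the 'for c in value.strip()' loop with the 'space' flag and the early 'return False'
def nimLoop : List Char → Int → Bool
  | [], _ => true
  | c :: rest, space =>
    if c = ' ' then
      if space = 0 then nimLoop rest (space + 1)
      else if space = 1 then false
      else nimLoop rest space
    else if space = 1 then nimLoop rest 0
    else nimLoop rest space

def no_inner_multispace (value : String) (value_range : String) : Bool :=
  if value ≠ "" then nimLoop (PySem.Str.strip value).toList 0
  else true

-- ===== PORT B =====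
def no_inner_multispace_alt (value : String) (value_range : String) : Bool :=
  !(PySem.Str.isIn "  " (PySem.Str.strip value))

-- ===== PRECONDITION & SPEC =====
def Spec_no_inner_multispace (value : String) (value_range : String) (out : Bool) : Prop := out = no_inner_multispace_alt value value_range
instance (value : String) (value_range : String) (out : Bool) : Decidable (Spec_no_inner_multispace value value_range out) := by unfold Spec_no_inner_multispace; infer_instance

-- ===== CLAIM (what is proved, stated in full; the proofs are below) =====
def Claim_equal_no_inner_multispace : Prop := ∀ (value : String) (value_range : String), Dom_no_inner_multispace value value_range → Spec_no_inner_multispace value value_range (no_inner_multispace value value_range)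

-- ===== LEMMAS AND PROOFS =====

-- an infix search for "  " may skip a head character that is not a space
theorem infix_dd_cons_of_ne (c : Char) (hc : c ≠ ' ') (l : List Char) :
    ([' ', ' '] <:+: c :: l) ↔ ([' ', ' '] <:+: l) := by
  rw [List.infix_cons_iff]
  constructor
  · rintro (⟨t, ht⟩ | h)
    · cases ht; exact absurd rfl hc
    · exact h
  · exact Or.inr

-- The state machine with flag 0 (resp. 1) accepts cs iff "  " is not an infix
-- of cs (resp. of ' ' :: cs).
theorem nimLoop_char (cs : List Char) :
    (nimLoop cs 0 = !(PySem.Chars.isIn [' ', ' '] cs)) ∧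
    (nimLoop cs 1 = !(PySem.Chars.isIn [' ', ' '] (' ' :: cs))) := by
  induction cs with
  | nil => exact ⟨by decide, by decide⟩
  | cons c rest ih =>
    obtain ⟨ih0, ih1⟩ := ih
    by_cases hc : c = ' '
    · subst hc
      refine ⟨by simpa [nimLoop] using ih1, ?_⟩
      have hdd : PySem.Chars.isIn [' ', ' '] (' ' :: ' ' :: rest) = true :=
        (PySem.Chars.isIn_iff_infix _ _).2 (List.infix_cons_iff.2 (Or.inl ⟨rest, rfl⟩))
      simp [nimLoop, hdd]
    · have hskip : PySem.Chars.isIn [' ', ' '] (c :: rest) =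
          PySem.Chars.isIn [' ', ' '] rest := by
        rw [Bool.eq_iff_iff, PySem.Chars.isIn_iff_infix, PySem.Chars.isIn_iff_infix]
        exact infix_dd_cons_of_ne c hc rest
      have hskip2 : PySem.Chars.isIn [' ', ' '] (' ' :: c :: rest) =
          PySem.Chars.isIn [' ', ' '] rest := by
        rw [Bool.eq_iff_iff, PySem.Chars.isIn_iff_infix, PySem.Chars.isIn_iff_infix]
        constructor
        · intro h
          rcases List.infix_cons_iff.1 h with ⟨t, ht⟩ | h2
          · simp only [List.cons_append, List.cons.injEq] at ht
            exact absurd ht.2.1.symm hc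
          · exact (infix_dd_cons_of_ne c hc rest).1 h2
        · intro h
          exact List.infix_cons_iff.2 (Or.inr ((infix_dd_cons_of_ne c hc rest).2 h))
      constructor
      · simp only [nimLoop, if_neg hc]
        norm_num
        rw [ih0, hskip]
      · simp only [nimLoop, if_neg hc]
        norm_num
        rw [ih0, hskip2]

theorem nimLoop_eq (cs : List Char) :
    nimLoop cs 0 = !(PySem.Chars.isIn [' ', ' '] cs) := (nimLoop_char cs).1

-- ===== VERDICT (by name: the statement is the Claim_ definition above) =====
theorem no_inner_multispace_spec : Claim_equal_no_inner_multispace := by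
  intro value value_range _
  unfold Spec_no_inner_multispace no_inner_multispace no_inner_multispace_alt
  by_cases hv : value = ""
  · subst hv
    decide
  · rw [if_pos hv, nimLoop_eq, PySem.Str.isIn_eq]
    rfl
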